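-- pv_equiv track=rewrite | github.com/ryanloftus/advent-of-code | 2025/3/part1.py | get_max_joltage
-- ===== SOURCE A (Python) =====
-- def get_max_joltage(bank):
--     d1 = 0
--     d2 = 0
--     for i in range(len(bank)):
--         if bank[i] > d1 and i < len(bank)-1:
--             d1 = bank[i]
--             d2 = 0
--         elif bank[i] > d2:
--             d2 = bank[i]
--     return d1 * 10 + d2
-- ===== SOURCE B (Python) =====
-- def get_max_joltage(bank):
--     prefix = bank[:-1]
--     d1 = max(max(prefix, default=0), 0)
--     rest = bank[prefix.index(d1) + 1:] if d1 > 0 else bank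
--     return d1 * 10 + max(max(rest, default=0), 0)
-- ===== Notes on version B (the rewrite author's own statement) =====
-- stated objective: simpler
-- what changed: Replaces A's single fused loop with two interacting accumulators by a direct slice/max/index formulation: d1 is the 0-floored max of bank[:-1], and d2 is the 0-floored max of the suffix after the first occurrence of d1 (or of the whole list if no prefix value is positive).
import Mathlib
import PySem

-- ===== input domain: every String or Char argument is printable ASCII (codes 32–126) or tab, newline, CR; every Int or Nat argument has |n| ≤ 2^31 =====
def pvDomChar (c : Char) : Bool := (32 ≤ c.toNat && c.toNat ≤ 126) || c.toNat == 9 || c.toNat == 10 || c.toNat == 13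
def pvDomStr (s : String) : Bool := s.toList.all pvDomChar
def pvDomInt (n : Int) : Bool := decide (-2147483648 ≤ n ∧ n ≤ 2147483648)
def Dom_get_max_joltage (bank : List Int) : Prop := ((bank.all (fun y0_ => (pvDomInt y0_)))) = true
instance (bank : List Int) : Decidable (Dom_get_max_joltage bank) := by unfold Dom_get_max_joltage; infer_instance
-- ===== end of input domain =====

-- B replaces A's fused single loop with a slice/max/index formulation (same O(n) cost, plainer decomposition).


-- ===== PORT A =====
-- A's loop over i in range(len(bank)) reading bank[i] is ported as a fold over enumerate(bank):
-- the index is always in range, and the 'i < len(bank)-1' test uses the absolute index p.1.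
def get_max_joltage (bank : List Int) : Int :=
  let s := (PySem.List.enumerate bank 0).foldl (fun (st : Int × Int) p =>
    if p.2 > st.1 ∧ p.1 < (bank.length : Int) - 1 then (p.2, 0)
    else if p.2 > st.2 then (st.1, p.2) else st) (0, 0)
  s.1 * 10 + s.2

-- ===== PORT B =====
-- pre.index(d1) is only evaluated when d1 > 0, where d1 = max(pre) ∈ pre, so the
-- .getD 0 default on index? is unreachable (Python's .index never raises here).
def get_max_joltage_alt (bank : List Int) : Int :=
  let pre := PySem.List.slice bank none (some (-1))
  let d1 := max ((PySem.List.max? pre (fun x => x)).getD 0) 0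
  let rest := if d1 > 0 then
      PySem.List.slice bank (some ((((PySem.List.index? pre d1).getD 0 : Nat) : Int) + 1)) none
    else bank
  d1 * 10 + max ((PySem.List.max? rest (fun x => x)).getD 0) 0

-- ===== PRECONDITION & SPEC =====
def Spec_get_max_joltage (bank : List Int) (out : Int) : Prop := out = get_max_joltage_alt bank
instance (bank : List Int) (out : Int) : Decidable (Spec_get_max_joltage bank out) := by unfold Spec_get_max_joltage; infer_instance

-- ===== CLAIM (what is proved, stated in full; the proofs are below) =====
def Claim_equal_get_max_joltage : Prop := ∀ (bank : List Int), Dom_get_max_joltage bank → Spec_get_max_joltage bank (get_max_joltage bank)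

-- ===== LEMMAS AND PROOFS =====

-- structural form of A's loop: the 'i < len-1' test becomes 'rest ≠ []'
def loopA : List Int → Int → Int → Int × Int
  | [], d1, d2 => (d1, d2)
  | x :: rest, d1, d2 =>
    if x > d1 ∧ rest ≠ [] then loopA rest x 0
    else if x > d2 then loopA rest d1 x else loopA rest d1 d2

theorem foldl_max_extract (l : List Int) (a b : Int) :
    l.foldl max (max a b) = max a (l.foldl max b) := by
  induction l generalizing b with
  | nil => rfl
  | cons x t ih => simp only [List.foldl_cons, max_assoc]; exact ih (max b x)

theorem enumFold_eq_loopA (xs : List Int) (s N : Int) (h : N = s + xs.length)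
    (d1 d2 : Int) :
    (PySem.List.enumerate xs s).foldl (fun (st : Int × Int) p =>
      if p.2 > st.1 ∧ p.1 < N - 1 then (p.2, 0)
      else if p.2 > st.2 then (st.1, p.2) else st) (d1, d2) = loopA xs d1 d2 := by
  induction xs generalizing s d1 d2 with
  | nil => simp [PySem.List.enumerate_nil, loopA]
  | cons x rest ih =>
    rw [PySem.List.enumerate_cons, List.foldl_cons, loopA]
    have hN : N = (s + 1) + (rest.length : Int) := by
      subst h; simp only [List.length_cons]; push_cast; ring
    have hc : (s < N - 1) ↔ rest ≠ [] := by
      subst hN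
      constructor
      · intro hlt hne
        subst hne; simp at hlt
      · intro hne
        have : 0 < rest.length := List.length_pos_iff.mpr hne
        omega
    by_cases h1 : x > d1 ∧ s < N - 1
    · rw [if_pos ⟨h1.1, h1.2⟩, ih (s + 1) hN, if_pos ⟨h1.1, hc.mp h1.2⟩]
    · rw [if_neg h1]
      have h1' : ¬(x > d1 ∧ rest ≠ []) := fun hcc => h1 ⟨hcc.1, hc.mpr hcc.2⟩
      rw [if_neg h1']
      by_cases h2 : x > d2
      · rw [if_pos h2, if_pos h2, ih (s + 1) hN]
      · rw [if_neg h2, if_neg h2, ih (s + 1) hN]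

-- characterization of A's loop: the pair it returns, in B's terms
theorem loopA_eq (bank : List Int) (d1 d2 : Int) :
    loopA bank d1 d2 =
      (if d1 < bank.dropLast.foldl max d1 then
        (bank.dropLast.foldl max d1,
          (bank.drop (bank.dropLast.idxOf (bank.dropLast.foldl max d1) + 1)).foldl max 0)
       else (d1, bank.foldl max d2)) := by
  induction bank generalizing d1 d2 with
  | nil => simp [loopA]
  | cons x rest ih =>
    by_cases hr : rest = []
    · subst hr
      by_cases h2 : x > d2
      · simp [loopA, h2, max_eq_right h2.le]
      · simp [loopA, h2, max_eq_left (not_lt.mp h2)]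
    · have hdl : (x :: rest).dropLast = x :: rest.dropLast := by
        cases rest with
        | nil => exact absurd rfl hr
        | cons y t => rfl
      rw [loopA, hdl]
      simp only [List.foldl_cons]
      by_cases h1 : x > d1
      · rw [if_pos ⟨h1, hr⟩, ih x 0, max_eq_right h1.le]
        have hxm : x ≤ rest.dropLast.foldl max x := (PySem.List.le_foldl_max _ _).1
        by_cases hlt : x < rest.dropLast.foldl max x
        · rw [if_pos hlt, if_pos (lt_trans h1 hlt)]
          rw [List.idxOf_cons_ne _ (ne_of_lt hlt), Nat.succ_eq_add_one, List.drop_succ_cons]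
        · have hx : rest.dropLast.foldl max x = x := le_antisymm (not_lt.mp hlt) hxm
          rw [if_neg hlt, hx, if_pos h1, List.idxOf_cons_self, List.drop_succ_cons, List.drop_zero]
      · rw [if_neg (fun hcc => h1 hcc.1), max_eq_left (not_lt.mp h1)]
        have key : ∀ d2' : Int, loopA rest d1 d2' =
            (if d1 < rest.dropLast.foldl max d1 then
              (rest.dropLast.foldl max d1,
                ((x :: rest).drop ((x :: rest.dropLast).idxOf (rest.dropLast.foldl max d1) + 1)).foldl max 0)
             else (d1, rest.foldl max d2')) := by
          intro d2'
          rw [ih d1 d2']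
          by_cases hlt : d1 < rest.dropLast.foldl max d1
          · rw [if_pos hlt, if_pos hlt]
            have hne : x ≠ rest.dropLast.foldl max d1 := ne_of_lt (lt_of_le_of_lt (not_lt.mp h1) hlt)
            rw [List.idxOf_cons_ne _ hne, Nat.succ_eq_add_one, List.drop_succ_cons]
          · rw [if_neg hlt, if_neg hlt]
        by_cases h2 : x > d2
        · rw [if_pos h2, max_eq_right h2.le]
          exact key x
        · rw [if_neg h2, max_eq_left (not_lt.mp h2)]
          exact key d2

theorem foldl_max_zero_eq_maxD (l : List Int) :
    max ((PySem.List.max? l (fun x => x)).getD 0) 0 = l.foldl max 0 := by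
  cases l with
  | nil => simp [PySem.List.max?]
  | cons x t =>
    rw [PySem.List.max?_id_cons]
    simp only [Option.getD_some, List.foldl_cons]
    rw [max_comm (t.foldl max x) 0, ← foldl_max_extract, max_comm 0 x]

theorem index_getD_eq_idxOf (l : List Int) (v : Int) (hv : v ∈ l) :
    ((PySem.List.index? l v).getD 0 : Nat) = l.idxOf v := by
  induction l with
  | nil => exact absurd hv (List.not_mem_nil)
  | cons x t ih =>
    by_cases hx : x = v
    · subst hx
      rw [PySem.List.index?_cons_self, List.idxOf_cons_self]
      rfl
    · rw [PySem.List.index?_cons_of_ne t hx, List.idxOf_cons_ne _ hx]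
      have hvt : v ∈ t := by
        rcases List.mem_cons.mp hv with h | h
        · exact absurd h.symm hx
        · exact h
      obtain ⟨k, hk⟩ := Option.isSome_iff_exists.mp ((PySem.List.index?_isSome_iff t v).mpr hvt)
      rw [hk]
      simp only [Option.map_some, Option.getD_some, Nat.succ_eq_add_one]
      have := ih hvt
      rw [hk] at this
      simp only [Option.getD_some] at this
      omega

-- ===== VERDICT (by name: the statement is the Claim_ definition above) =====
theorem get_max_joltage_spec : Claim_equal_get_max_joltage := by
  intro bank _
  unfold Spec_get_max_joltage get_max_joltage get_max_joltage_alt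
  have henum : ((PySem.List.enumerate bank 0).foldl (fun (st : Int × Int) p =>
      if p.2 > st.1 ∧ p.1 < (bank.length : Int) - 1 then (p.2, 0)
      else if p.2 > st.2 then (st.1, p.2) else st) (0, 0)) = loopA bank 0 0 :=
    enumFold_eq_loopA bank 0 bank.length (by simp) 0 0
  simp only [henum, loopA_eq, PySem.List.slice_to_neg_one, foldl_max_zero_eq_maxD]
  have hm0 : (0 : Int) ≤ bank.dropLast.foldl max 0 := (PySem.List.le_foldl_max _ _).1
  by_cases hpos : (0 : Int) < bank.dropLast.foldl max 0
  · rw [if_pos hpos, if_pos hpos]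
    have hmem : bank.dropLast.foldl max 0 ∈ bank.dropLast := by
      rcases PySem.List.foldl_max_mem bank.dropLast 0 with h0 | hm
      · rw [h0] at hpos; exact absurd hpos (lt_irrefl 0)
      · exact hm
    rw [index_getD_eq_idxOf _ _ hmem]
    have hcast : ((bank.dropLast.idxOf (bank.dropLast.foldl max 0) : Int) + 1)
        = ((bank.dropLast.idxOf (bank.dropLast.foldl max 0) + 1 : Nat) : Int) := by
      push_cast; ring
    rw [hcast, PySem.List.slice_from_natCast]
  · rw [if_neg hpos, if_neg hpos]
    have hmz : bank.dropLast.foldl max 0 = 0 := le_antisymm (not_lt.mp hpos) hm0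
    simp [hmz]
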